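-- pv_equiv track=rewrite | github.com/jas10220831/SWEA-Algorithm | 0906/11688_CalkinWilftree1/s1.py | tree1
-- ===== SOURCE A (Python) =====
-- def tree1(roots):
--     # 루트 1/1
--     a = 1
--     b = 1
--     for root in roots:
--         if root == 'L':
--             a = a
--             b = a + b
--
--         else:
--             a = a + b
--             b = b
--     return [a, b]
-- ===== SOURCE B (Python) =====
-- def tree1(roots):
--     # Run-length walk: collapse each maximal run of identical moves into one
--     # multiply-add instead of repeated additions.
--     a, b = 1, 1
--     i, n = 0, len(roots)
--     while i < n:
--         j = i
--         while j < n and roots[j] == roots[i]: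
--             j += 1
--         k = j - i
--         if roots[i] == 'L':
--             b += k * a
--         else:
--             a += k * b
--         i = j
--     return [a, b]
-- ===== Notes on version B (the rewrite author's own statement) =====
-- stated objective: alternative
-- what changed: B walks maximal runs of identical moves and applies one multiply-add (b += k*a or a += k*b) per run, instead of A's one addition per element.
import Mathlib
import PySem

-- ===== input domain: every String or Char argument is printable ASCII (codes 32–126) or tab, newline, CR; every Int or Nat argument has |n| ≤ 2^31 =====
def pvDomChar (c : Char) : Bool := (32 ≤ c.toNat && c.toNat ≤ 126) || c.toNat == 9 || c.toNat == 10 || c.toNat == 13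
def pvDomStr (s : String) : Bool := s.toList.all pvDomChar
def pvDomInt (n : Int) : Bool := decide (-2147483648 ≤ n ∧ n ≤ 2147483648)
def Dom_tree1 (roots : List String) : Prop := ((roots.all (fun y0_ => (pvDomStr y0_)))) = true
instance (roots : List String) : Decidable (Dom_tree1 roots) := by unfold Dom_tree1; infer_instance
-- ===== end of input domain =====

-- B walks maximal runs of identical moves with one multiply-add per run; A adds once per element.

-- ===== PORT A =====
-- A: a,b start at 1; per element, 'L' does b := a + b, otherwise a := a + b.
def tree1 (roots : List String) : List Int :=
  let p := roots.foldl
    (fun (ab : Int × Int) root =>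
      if root == "L" then (ab.1, ab.1 + ab.2) else (ab.1 + ab.2, ab.2))
    (1, 1)
  [p.1, p.2]

-- ===== PORT B =====
-- B's outer while-loop over maximal runs; the inner counting while-loop is
-- takeWhile/dropWhile on the remaining list.
def tree1AltGo (l : List String) (a b : Int) : List Int :=
  match l with
  | [] => [a, b]
  | x :: xs =>
    let k : Int := 1 + (xs.takeWhile (· == x)).length
    let rest := xs.dropWhile (· == x)
    if x == "L" then tree1AltGo rest a (b + k * a)
    else tree1AltGo rest (a + k * b) b
termination_by l.length
decreasing_by
  all_goals
    simpa using Nat.lt_succ_of_le (List.length_dropWhile_le (· == x) xs)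

def tree1_alt (roots : List String) : List Int := tree1AltGo roots 1 1

-- ===== PRECONDITION & SPEC =====
def Spec_tree1 (roots : List String) (out : List Int) : Prop := out = tree1_alt roots
instance (roots : List String) (out : List Int) : Decidable (Spec_tree1 roots out) := by unfold Spec_tree1; infer_instance

-- ===== CLAIM (what is proved, stated in full; the proofs are below) =====
def Claim_equal_tree1 : Prop := ∀ (roots : List String), Dom_tree1 roots → Spec_tree1 roots (tree1 roots)

-- ===== LEMMAS AND PROOFS =====

def pvStep (ab : Int × Int) (root : String) : Int × Int :=
  if root == "L" then (ab.1, ab.1 + ab.2) else (ab.1 + ab.2, ab.2)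

-- folding A's step over a run of copies of "L" adds length·a to b
theorem pvFoldRunL (seg : List String) (a b : Int) (h : ∀ y ∈ seg, y = "L") :
    seg.foldl pvStep (a, b) = (a, b + (seg.length : Int) * a) := by
  induction seg generalizing b with
  | nil => simp
  | cons x xs ih =>
    have hx : x = "L" := h x (by simp)
    simp only [List.foldl_cons, pvStep, hx]
    rw [if_pos (by simp : ("L" == "L") = true)]
    rw [ih _ (fun y hy => h y (by simp [hy]))]
    simp only [List.length_cons]
    congr 1
    push_cast
    ring

-- folding A's step over a run of copies of x ≠ "L" adds length·b to a
theorem pvFoldRunR (seg : List String) (x : String) (hx : x ≠ "L") (a b : Int)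
    (h : ∀ y ∈ seg, y = x) :
    seg.foldl pvStep (a, b) = (a + (seg.length : Int) * b, b) := by
  induction seg generalizing a with
  | nil => simp
  | cons z zs ih =>
    have hz : z = x := h z (by simp)
    simp only [List.foldl_cons, pvStep, hz]
    rw [if_neg (by simpa using hx)]
    rw [ih _ (fun y hy => h y (by simp [hy]))]
    simp only [List.length_cons]
    congr 1
    push_cast
    ring

theorem pvGoEq (l : List String) (a b : Int) :
    tree1AltGo l a b = [(l.foldl pvStep (a, b)).1, (l.foldl pvStep (a, b)).2] := by
  induction l, a, b using tree1AltGo.induct with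
  | case1 a b => simp [tree1AltGo]
  | case2 a b x xs k rest hL ih =>
    have hx : x = "L" := by simpa using hL
    rw [tree1AltGo, if_pos hL, ih]
    have hsplit : x :: xs = (x :: xs.takeWhile (· == x)) ++ rest := by
      simpa [rest] using (List.takeWhile_append_dropWhile (p := (· == x)) (l := xs)).symm
    have hrun : ∀ y ∈ x :: xs.takeWhile (· == x), y = "L" := by
      intro y hy
      rcases List.mem_cons.mp hy with h | h
      · simpa [h] using hx
      · have hyx : y = x := by simpa using List.mem_takeWhile_imp h
        simpa [hyx] using hx
    have hinit : b + k * a = b + (((x :: xs.takeWhile (· == x)).length : Int)) * a := by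
      simp only [k, List.length_cons]
      push_cast
      ring
    rw [hsplit, List.foldl_append, pvFoldRunL _ _ _ hrun, ← hinit]
  | case3 a b x xs k rest hL ih =>
    have hxne : x ≠ "L" := fun hc => hL (by simp [hc])
    rw [tree1AltGo, if_neg hL, ih]
    have hsplit : x :: xs = (x :: xs.takeWhile (· == x)) ++ rest := by
      simpa [rest] using (List.takeWhile_append_dropWhile (p := (· == x)) (l := xs)).symm
    have hrun : ∀ y ∈ x :: xs.takeWhile (· == x), y = x := by
      intro y hy
      rcases List.mem_cons.mp hy with h | h
      · exact h
      · simpa using List.mem_takeWhile_imp h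
    have hinit : a + k * b = a + (((x :: xs.takeWhile (· == x)).length : Int)) * b := by
      simp only [k, List.length_cons]
      push_cast
      ring
    rw [hsplit, List.foldl_append, pvFoldRunR _ x hxne _ _ hrun, ← hinit]

-- ===== VERDICT (by name: the statement is the Claim_ definition above) =====
theorem tree1_spec : Claim_equal_tree1 := by
  intro roots _
  unfold Spec_tree1 tree1 tree1_alt
  rw [pvGoEq]
  rfl
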